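-- pv_equiv track=rewrite | github.com/Chiu-LJ/Bonus | hw6_2.py | crush_candies
-- ===== SOURCE A (Python) =====
-- def crush_candies(board):
--     rows, cols = len(board), len(board[0])
--     crush = set()
--
--     for r in range(rows):
--         for c in range(cols):
--             if c > 1 and board[r][c] and board[r][c] == board[r][c-1] == board[r][c-2]:
--                 crush.update({(r, c), (r, c-1), (r, c-2)})
--             if r > 1 and board[r][c] and board[r][c] == board[r-1][c] == board[r-2][c]:
--                 crush.update({(r, c), (r-1, c), (r-2, c)})
--
--     if not crush:
--         return False, 0
--
--     score = len(crush)
--     for r, c in crush: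
--         board[r][c] = 0
--
--     return True, score
-- ===== SOURCE B (Python) =====
-- def crush_candies(board):
--     rows, cols = len(board), len(board[0])
--
--     def crushed(r, c):
--         h = any(board[r][s] and board[r][s] == board[r][s + 1] == board[r][s + 2]
--                 for s in range(max(c - 2, 0), min(c, cols - 3) + 1))
--         v = any(board[s][c] and board[s][c] == board[s + 1][c] == board[s + 2][c]
--                 for s in range(max(r - 2, 0), min(r, rows - 3) + 1))
--         return h or v
--
--     hits = [(r, c) for r in range(rows) for c in range(cols) if crushed(r, c)]
--     if not hits:
--         return False, 0
--     for r, c in hits: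
--         board[r][c] = 0
--     return True, len(hits)
-- ===== Notes on version B (the rewrite author's own statement) =====
-- stated objective: alternative
-- what changed: B replaces A's right-anchored triple checks that accumulate a deduplicating set with a per-cell predicate (is this cell inside some equal-nonzero window of three in its row or column?) and counts the matching grid cells directly, so no set is built.
-- outside the precondition, e.g. on crush_candies([[1, 2], [0], [0, 0]]): A returns (False, 0), B raises IndexError; on crush_candies([[1, 1], [1]]): A returns (False, 0), B returns (False, 0)
import Mathlib
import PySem

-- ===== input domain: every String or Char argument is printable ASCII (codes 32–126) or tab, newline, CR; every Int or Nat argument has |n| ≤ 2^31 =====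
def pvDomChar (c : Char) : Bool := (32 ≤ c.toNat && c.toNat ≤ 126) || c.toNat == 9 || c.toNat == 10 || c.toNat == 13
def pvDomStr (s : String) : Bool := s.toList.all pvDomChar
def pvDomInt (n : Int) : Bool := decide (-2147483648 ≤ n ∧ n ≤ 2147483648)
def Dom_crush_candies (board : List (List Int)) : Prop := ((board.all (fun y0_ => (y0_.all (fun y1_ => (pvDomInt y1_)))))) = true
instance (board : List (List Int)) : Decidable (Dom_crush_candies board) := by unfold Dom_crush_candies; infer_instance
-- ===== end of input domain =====

-- B swaps A's accumulate-a-set strategy for direct per-cell counting; both ports prove the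
-- RETURN value only — A (and B) also zero the crushed cells of the caller's board in place.

-- ===== PORT A =====
-- board[r][c]; the default is never used on inputs admitted by Pre_ (every access is in range there)
def pvCell (board : List (List Int)) (r c : Int) : Int :=
  (PySem.List.pyGet? ((PySem.List.pyGet? board r).getD []) c).getD 0

-- 'c > 1 and board[r][c] and board[r][c] == board[r][c-1] == board[r][c-2]'
def pvCondH (board : List (List Int)) (r c : Int) : Bool :=
  decide (1 < c ∧ pvCell board r c ≠ 0 ∧ pvCell board r c = pvCell board r (c-1) ∧
          pvCell board r (c-1) = pvCell board r (c-2))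

def pvCondV (board : List (List Int)) (r c : Int) : Bool :=
  decide (1 < r ∧ pvCell board r c ≠ 0 ∧ pvCell board r c = pvCell board (r-1) c ∧
          pvCell board (r-1) c = pvCell board (r-2) c)

def pvStepA (board : List (List Int)) (crush : PySem.Set (Int × Int)) (r c : Int) :
    PySem.Set (Int × Int) :=
  let crush1 := if pvCondH board r c then PySem.Set.update crush [(r, c), (r, c-1), (r, c-2)] else crush
  if pvCondV board r c then PySem.Set.update crush1 [(r, c), (r-1, c), (r-2, c)] else crush1

def crush_candies (board : List (List Int)) : Bool × Int :=
  let rows : Int := board.length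
  let cols : Int := (board.headD []).length
  let crush : PySem.Set (Int × Int) :=
    (PySem.List.pyRange 0 rows 1).foldl (fun s r =>
      (PySem.List.pyRange 0 cols 1).foldl (fun s c => pvStepA board s r c) s) PySem.Set.empty
  if crush = ([] : List (Int × Int)) then (false, 0) else (true, (PySem.Set.len crush : Int))

-- ===== PORT B =====
def pvWinH (board : List (List Int)) (r s : Int) : Bool :=
  decide (pvCell board r s ≠ 0 ∧ pvCell board r s = pvCell board r (s+1) ∧
          pvCell board r (s+1) = pvCell board r (s+2))

def pvWinV (board : List (List Int)) (c s : Int) : Bool :=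
  decide (pvCell board s c ≠ 0 ∧ pvCell board s c = pvCell board (s+1) c ∧
          pvCell board (s+1) c = pvCell board (s+2) c)

def pvCrushedB (board : List (List Int)) (rows cols r c : Int) : Bool :=
  ((PySem.List.pyRange (max (c-2) 0) (min c (cols-3) + 1) 1).any (fun s => pvWinH board r s)) ||
  ((PySem.List.pyRange (max (r-2) 0) (min r (rows-3) + 1) 1).any (fun s => pvWinV board c s))

def crush_candies_alt (board : List (List Int)) : Bool × Int :=
  let rows : Int := board.length
  let cols : Int := (board.headD []).length
  let hits : List (Int × Int) :=
    (PySem.List.pyRange 0 rows 1).flatMap (fun r =>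
      ((PySem.List.pyRange 0 cols 1).filter (fun c => pvCrushedB board rows cols r c)).map
        (fun c => (r, c)))
  if hits = [] then (false, 0) else (true, (hits.length : Int))

-- ===== PRECONDITION & SPEC =====
-- Pre_ excludes the empty board (A raises IndexError on board[0]) and ragged boards with a row
-- shorter than row 0, on which A raises IndexError for most shapes/values; it thereby also
-- excludes the few such ragged boards on which A happens to return because loop bounds or
-- short-circuiting skip the missing cells.
def Pre_crush_candies (board : List (List Int)) : Prop :=
  board ≠ [] ∧ ∀ row ∈ board, (board.headD []).length ≤ row.length

instance (board : List (List Int)) : Decidable (Pre_crush_candies board) := by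
  unfold Pre_crush_candies; infer_instance

def pvWitness_crush_candies : List (List Int) := [[1, 1, 1], [2, 0, 2]]

def Spec_crush_candies (board : List (List Int)) (out : Bool × Int) : Prop := out = crush_candies_alt board
instance (board : List (List Int)) (out : Bool × Int) : Decidable (Spec_crush_candies board out) := by unfold Spec_crush_candies; infer_instance

-- ===== CLAIM (what is proved, stated in full; the proofs are below) =====
def Claim_equal_crush_candies : Prop := ∀ (board : List (List Int)), Dom_crush_candies board → Pre_crush_candies board → Spec_crush_candies board (crush_candies board)

-- ===== LEMMAS AND PROOFS =====

-- the pairs pvStepA adds at cell (r, c)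
def pvAdds (board : List (List Int)) (r c : Int) (p : Int × Int) : Prop :=
  (pvCondH board r c = true ∧ (p = (r, c) ∨ p = (r, c-1) ∨ p = (r, c-2))) ∨
  (pvCondV board r c = true ∧ (p = (r, c) ∨ p = (r-1, c) ∨ p = (r-2, c)))

theorem mem_pvStepA (board : List (List Int)) (s : PySem.Set (Int × Int)) (r c : Int)
    (p : Int × Int) : p ∈ pvStepA board s r c ↔ p ∈ s ∨ pvAdds board r c p := by
  unfold pvStepA pvAdds
  split_ifs with h1 h2 h2 <;>
    simp [h1, h2] <;> tauto

theorem nodup_pvStepA (board : List (List Int)) (s : PySem.Set (Int × Int)) (r c : Int)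
    (hs : s.Nodup) : (pvStepA board s r c).Nodup := by
  unfold pvStepA
  split_ifs <;> first
  | exact PySem.Set.nodup_update _ _ hs
  | exact PySem.Set.nodup_update _ _ (PySem.Set.nodup_update _ _ hs)
  | exact hs

theorem mem_foldl_pvStepA (board : List (List Int)) (l : List Int) (r : Int)
    (s : PySem.Set (Int × Int)) (p : Int × Int) :
    p ∈ l.foldl (fun s c => pvStepA board s r c) s ↔ p ∈ s ∨ ∃ c ∈ l, pvAdds board r c p := by
  induction l generalizing s with
  | nil => simp
  | cons c l ih => simp [List.foldl_cons, ih, mem_pvStepA, or_assoc]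

theorem mem_foldl2_pvStepA (board : List (List Int)) (lr lc : List Int)
    (s : PySem.Set (Int × Int)) (p : Int × Int) :
    p ∈ lr.foldl (fun s r => lc.foldl (fun s c => pvStepA board s r c) s) s ↔
      p ∈ s ∨ ∃ r ∈ lr, ∃ c ∈ lc, pvAdds board r c p := by
  induction lr generalizing s with
  | nil => simp
  | cons r lr ih => simp [List.foldl_cons, ih, mem_foldl_pvStepA, or_assoc]

theorem nodup_foldl2_pvStepA (board : List (List Int)) (lr lc : List Int)
    (s : PySem.Set (Int × Int)) (hs : s.Nodup) :
    (lr.foldl (fun s r => lc.foldl (fun s c => pvStepA board s r c) s) s).Nodup := by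
  induction lr generalizing s with
  | nil => exact hs
  | cons r lr ih =>
    refine ih _ ?_
    clear ih
    induction lc generalizing s with
    | nil => exact hs
    | cons c lc ih2 => exact ih2 _ (nodup_pvStepA board s r c hs)

-- index shuffling between A's right-anchored window at c and B's left-anchored window at s
theorem winH_of_condH (board : List (List Int)) (r c' : Int) (h : pvCondH board r c' = true) :
    pvWinH board r (c' - 2) = true := by
  simp only [pvCondH, pvWinH, decide_eq_true_eq] at *
  obtain ⟨h1, h2, h3, h4⟩ := h
  rw [show c' - 2 + 1 = c' - 1 by ring, show c' - 2 + 2 = c' by ring]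
  exact ⟨fun hz => h2 (by rw [h3, h4]; exact hz), h4.symm, h3.symm⟩

theorem condH_of_winH (board : List (List Int)) (r s : Int) (hs : 0 ≤ s)
    (h : pvWinH board r s = true) : pvCondH board r (s + 2) = true := by
  simp only [pvCondH, pvWinH, decide_eq_true_eq] at *
  obtain ⟨h1, h2, h3⟩ := h
  rw [show s + 2 - 1 = s + 1 by ring, show s + 2 - 2 = s by ring]
  exact ⟨by omega, fun hz => h1 (by rw [h2, h3]; exact hz), h3.symm, h2.symm⟩

theorem winV_of_condV (board : List (List Int)) (c r' : Int) (h : pvCondV board r' c = true) :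
    pvWinV board c (r' - 2) = true := by
  simp only [pvCondV, pvWinV, decide_eq_true_eq] at *
  obtain ⟨h1, h2, h3, h4⟩ := h
  rw [show r' - 2 + 1 = r' - 1 by ring, show r' - 2 + 2 = r' by ring]
  exact ⟨fun hz => h2 (by rw [h3, h4]; exact hz), h4.symm, h3.symm⟩

theorem condV_of_winV (board : List (List Int)) (c s : Int) (hs : 0 ≤ s)
    (h : pvWinV board c s = true) : pvCondV board (s + 2) c = true := by
  simp only [pvCondV, pvWinV, decide_eq_true_eq] at *
  obtain ⟨h1, h2, h3⟩ := h
  rw [show s + 2 - 1 = s + 1 by ring, show s + 2 - 2 = s by ring]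
  exact ⟨by omega, fun hz => h1 (by rw [h2, h3]; exact hz), h3.symm, h2.symm⟩

theorem condH_gt (board : List (List Int)) (r c : Int) (h : pvCondH board r c = true) : 1 < c := by
  simp only [pvCondH, decide_eq_true_eq] at h; exact h.1

theorem condV_gt (board : List (List Int)) (r c : Int) (h : pvCondV board r c = true) : 1 < r := by
  simp only [pvCondV, decide_eq_true_eq] at h; exact h.1

-- the core correspondence: cell (r,c) of the grid is added by some window of A
-- iff B's per-cell predicate holds
theorem adds_iff_crushedB (board : List (List Int)) (rows cols r c : Int)
    (hr : 0 ≤ r) (hr2 : r < rows) (hc : 0 ≤ c) (hc2 : c < cols) :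
    (∃ r' ∈ PySem.List.pyRange 0 rows 1, ∃ c' ∈ PySem.List.pyRange 0 cols 1,
        pvAdds board r' c' (r, c)) ↔ pvCrushedB board rows cols r c = true := by
  unfold pvCrushedB
  simp only [Bool.or_eq_true, List.any_eq_true, PySem.List.mem_pyRange_one, pvAdds,
    Prod.mk.injEq]
  constructor
  · rintro ⟨r', hr', c', hc', ⟨hcond, hp⟩ | ⟨hcond, hp⟩⟩
    · have h1 := condH_gt board r' c' hcond
      have hrr : r = r' := by omega
      left
      exact ⟨c' - 2, by omega, hrr ▸ winH_of_condH board r' c' hcond⟩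
    · have h1 := condV_gt board r' c' hcond
      have hcc : c = c' := by omega
      right
      exact ⟨r' - 2, by omega, hcc ▸ winV_of_condV board c' r' hcond⟩
  · rintro (⟨s, hs, hwin⟩ | ⟨s, hs, hwin⟩)
    · refine ⟨r, by omega, s + 2, by omega, Or.inl ⟨condH_of_winH board r s (by omega) hwin, ?_⟩⟩
      omega
    · refine ⟨s + 2, by omega, c, by omega, Or.inr ⟨condV_of_winV board c s (by omega) hwin, ?_⟩⟩
      omega

-- members added by A lie inside the grid
theorem adds_in_grid (board : List (List Int)) (rows cols r' c' : Int) (p : Int × Int)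
    (hr' : 0 ≤ r' ∧ r' < rows) (hc' : 0 ≤ c' ∧ c' < cols) (h : pvAdds board r' c' p) :
    0 ≤ p.1 ∧ p.1 < rows ∧ 0 ≤ p.2 ∧ p.2 < cols := by
  rcases h with ⟨hcond, hp⟩ | ⟨hcond, hp⟩ <;>
  · simp only [pvCondH, pvCondV, decide_eq_true_eq] at hcond
    rcases hp with hp | hp | hp <;> subst hp <;> simp <;> omega

-- B's hits list: membership and nodup
theorem mem_hits (board : List (List Int)) (rows cols : Int) (p : Int × Int) :
    p ∈ (PySem.List.pyRange 0 rows 1).flatMap (fun r =>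
        ((PySem.List.pyRange 0 cols 1).filter (fun c => pvCrushedB board rows cols r c)).map
          (fun c => (r, c))) ↔
      (0 ≤ p.1 ∧ p.1 < rows) ∧ (0 ≤ p.2 ∧ p.2 < cols) ∧
        pvCrushedB board rows cols p.1 p.2 = true := by
  obtain ⟨r, c⟩ := p
  simp only [List.mem_flatMap, List.mem_map, List.mem_filter, PySem.List.mem_pyRange_one]
  constructor
  · rintro ⟨r', hr', c', ⟨hc', hcr⟩, he⟩
    injection he with e1 e2; subst e1; subst e2
    exact ⟨hr', hc', hcr⟩
  · rintro ⟨hr, hc, hcr⟩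
    exact ⟨r, hr, c, ⟨hc, hcr⟩, rfl⟩

theorem nodup_hits (board : List (List Int)) (rows cols : Int) :
    ((PySem.List.pyRange 0 rows 1).flatMap (fun r =>
        ((PySem.List.pyRange 0 cols 1).filter (fun c => pvCrushedB board rows cols r c)).map
          (fun c => (r, c)))).Nodup := by
  rw [List.nodup_flatMap]
  constructor
  · intro r _
    exact ((PySem.List.nodup_pyRange_one 0 cols).filter _).map
      (fun a b h => by simpa using congrArg Prod.snd h)
  · refine List.Pairwise.imp ?_ (PySem.List.nodup_pyRange_one 0 rows)
    intro a b hab p hp hq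
    simp only [List.mem_map, List.mem_filter] at hp hq
    obtain ⟨c1, _, e1⟩ := hp
    obtain ⟨c2, _, e2⟩ := hq
    subst e1
    injection e2 with e _
    exact hab e.symm
  
-- ===== VERDICT (by name: the statement is the Claim_ definition above) =====
theorem crush_candies_spec : Claim_equal_crush_candies := by
  intro board _ hpre
  unfold Spec_crush_candies crush_candies crush_candies_alt
  obtain ⟨hne, hlen⟩ := hpre
  set rows : Int := (board.length : Int) with hrows
  set cols : Int := ((board.headD []).length : Int) with hcols
  set crush := (PySem.List.pyRange 0 rows 1).foldl (fun s r =>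
      (PySem.List.pyRange 0 cols 1).foldl (fun s c => pvStepA board s r c) s)
      (PySem.Set.empty) with hcrush
  set hits := (PySem.List.pyRange 0 rows 1).flatMap (fun r =>
      ((PySem.List.pyRange 0 cols 1).filter (fun c => pvCrushedB board rows cols r c)).map
        (fun c => (r, c))) with hhits
  have hmemc : ∀ p, p ∈ crush ↔ ∃ r ∈ PySem.List.pyRange 0 rows 1,
      ∃ c ∈ PySem.List.pyRange 0 cols 1, pvAdds board r c p := by
    intro p
    rw [hcrush, mem_foldl2_pvStepA]
    simp [PySem.Set.empty]
  have hmem : ∀ p, p ∈ crush ↔ p ∈ hits := by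
    intro p
    rw [hmemc, hhits, mem_hits]
    constructor
    · rintro ⟨r', hr', c', hc', hadd⟩
      simp only [PySem.List.mem_pyRange_one] at hr' hc'
      have hg := adds_in_grid board rows cols r' c' p hr' hc' hadd
      refine ⟨⟨hg.1, hg.2.1⟩, ⟨hg.2.2.1, hg.2.2.2⟩, ?_⟩
      rw [← adds_iff_crushedB board rows cols p.1 p.2 hg.1 hg.2.1 hg.2.2.1 hg.2.2.2]
      exact ⟨r', by simp only [PySem.List.mem_pyRange_one]; omega, c',
        by simp only [PySem.List.mem_pyRange_one]; omega, by obtain ⟨a, b⟩ := p; exact hadd⟩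
    · rintro ⟨hr, hc, hcr⟩
      have := (adds_iff_crushedB board rows cols p.1 p.2 hr.1 hr.2 hc.1 hc.2).mpr hcr
      obtain ⟨r', hr', c', hc', hadd⟩ := this
      exact ⟨r', hr', c', hc', by obtain ⟨a, b⟩ := p; exact hadd⟩
  have hndc : crush.Nodup := nodup_foldl2_pvStepA board _ _ _ (by simp [PySem.Set.empty])
  have hndh : hits.Nodup := nodup_hits board rows cols
  have hperm : crush.Perm hits := (List.perm_ext_iff_of_nodup hndc hndh).mpr hmem
  have hlen' : crush.length = hits.length := hperm.length_eq
  have hempty : (crush = ([] : List (Int × Int))) ↔ hits = [] := by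
    rw [List.eq_nil_iff_forall_not_mem, List.eq_nil_iff_forall_not_mem]
    exact ⟨fun h p hp => h p ((hmem p).mpr hp), fun h p hp => h p ((hmem p).mp hp)⟩
  by_cases h : crush = ([] : List (Int × Int))
  · rw [if_pos h, if_pos (hempty.mp h)]
  · rw [if_neg h, if_neg (fun hh => h (hempty.mpr hh))]
    simp only [PySem.Set.len]
    rw [← hcrush, ← hhits, hlen']
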